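-- pv_equiv track=rewrite | github.com/voidcore1/hn | chunker.py | trim_document_to_budget
-- ===== SOURCE A (Python) =====
-- def trim_document_to_budget(document, char_budget):
--     """
--     Trim an already-built document to a character budget, cutting at
--     section boundaries (story separators '---') rather than mid-comment.
--
--     Used by the chat module to fit raw thread data into the context
--     window without destroying comment integrity.
--     """
--     if len(document) <= char_budget:
--         return document
--
--     sections = document.split("\n---\n\n")
--     trimmed = ""
--
--     for section in sections:
--         candidate = section + "\n---\n\n"
--         if len(trimmed) + len(candidate) <= char_budget:
--             trimmed += candidate
--         else:
--             break
--
--     return trimmed if trimmed else sections[0][:char_budget]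
-- ===== SOURCE B (Python) =====
-- def trim_document_to_budget(document, char_budget):
--     """Scan separator occurrences directly in the string with str.find and cut
--     the document at the last separator end that fits the budget; no split/join."""
--     if len(document) <= char_budget:
--         return document
--
--     sep = "\n---\n\n"
--     first = document.find(sep)
--     cut = -1
--     i = first
--     while i != -1 and i + 6 <= char_budget:
--         cut = i + 6
--         i = document.find(sep, i + 6)
--
--     if cut != -1:
--         return document[:cut]
--     head = document if first == -1 else document[:first]
--     return head[:char_budget]
-- ===== Notes on version B (the rewrite author's own statement) =====
-- stated objective: alternative
-- what changed: Instead of splitting the document into a section list and greedily re-concatenating sections, B never splits: it scans separator occurrences directly in the string with str.find and slices the document once at the last separator end that fits the budget (with the same first-section fallback).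
import Mathlib
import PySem

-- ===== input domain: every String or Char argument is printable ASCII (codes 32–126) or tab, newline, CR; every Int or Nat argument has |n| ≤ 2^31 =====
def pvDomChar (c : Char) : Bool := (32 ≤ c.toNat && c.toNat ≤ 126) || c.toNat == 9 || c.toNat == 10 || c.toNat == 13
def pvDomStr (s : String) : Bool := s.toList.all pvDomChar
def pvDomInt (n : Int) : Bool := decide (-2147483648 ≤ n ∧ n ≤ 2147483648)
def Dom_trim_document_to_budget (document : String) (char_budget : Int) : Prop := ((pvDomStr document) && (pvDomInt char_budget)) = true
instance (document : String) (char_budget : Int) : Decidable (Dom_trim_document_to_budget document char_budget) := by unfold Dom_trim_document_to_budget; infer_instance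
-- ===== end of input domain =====

-- B never splits the document: it scans separator occurrences directly with str.find and
-- slices the document once at the last separator end that fits — same value, different algorithm.

-- ===== PORT A =====

-- the separator "\n---\n\n"
def pvSep : List Char := ['\n', '-', '-', '-', '\n', '\n']

-- A's for-loop with break: accumulate `trimmed += section + sep` while it fits
def pvTrimLoopA (budget : Int) : List (List Char) → List Char → List Char
  | [], trimmed => trimmed
  | s :: rest, trimmed =>
      let candidate := s ++ pvSep
      if (trimmed.length : Int) + (candidate.length : Int) ≤ budget then
        pvTrimLoopA budget rest (trimmed ++ candidate)
      else
        trimmed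

def trim_document_to_budget (document : String) (char_budget : Int) : String :=
  if (PySem.Chars.len document.toList) ≤ char_budget then document
  else
    let sections := PySem.Chars.splitOn document.toList pvSep
    let trimmed := pvTrimLoopA char_budget sections []
    if trimmed ≠ [] then String.ofList trimmed
    else String.ofList (PySem.Chars.slice (PySem.List.pyGetD sections 0 []) none (some char_budget))

-- ===== PORT B =====

-- B's while loop: walk the separator occurrences with find; cut = last occurrence end that fits.
-- Fuel (doc.length + 1) only makes the recursion structural: each Python iteration moves the
-- search position forward by 6, so the loop always ends before the fuel does.
def pvScanB (doc : List Char) (budget : Int) : Nat → Int → Int → Int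
  | 0, _, cut => cut
  | fuel + 1, i, cut =>
      if i ≠ -1 ∧ i + 6 ≤ budget then
        pvScanB doc budget fuel (PySem.Chars.findFrom doc pvSep (i + 6) none) (i + 6)
      else cut

def trim_document_to_budget_alt (document : String) (char_budget : Int) : String :=
  if (PySem.Chars.len document.toList) ≤ char_budget then document
  else
    let doc := document.toList
    let first := PySem.Chars.find doc pvSep
    let cut := pvScanB doc char_budget (doc.length + 1) first (-1)
    if cut ≠ -1 then String.ofList (PySem.Chars.slice doc none (some cut))
    else
      let head := if first = -1 then doc else PySem.Chars.slice doc none (some first)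
      String.ofList (PySem.Chars.slice head none (some char_budget))

-- ===== PRECONDITION & SPEC =====
def Spec_trim_document_to_budget (document : String) (char_budget : Int) (out : String) : Prop := out = trim_document_to_budget_alt document char_budget
instance (document : String) (char_budget : Int) (out : String) : Decidable (Spec_trim_document_to_budget document char_budget out) := by unfold Spec_trim_document_to_budget; infer_instance

-- ===== CLAIM (what is proved, stated in full; the proofs are below) =====
def Claim_equal_trim_document_to_budget : Prop := ∀ (document : String) (char_budget : Int), Dom_trim_document_to_budget document char_budget → Spec_trim_document_to_budget document char_budget (trim_document_to_budget document char_budget)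

-- ===== LEMMAS AND PROOFS =====

-- find.go at offset k is find.go at offset 0, shifted (for the fixed needle pvSep)
lemma pvFindGo_shift (l : List Char) (k : Nat) :
    PySem.Chars.find.go pvSep l k =
      if PySem.Chars.find.go pvSep l 0 = -1 then -1
      else (k : Int) + PySem.Chars.find.go pvSep l 0 := by
  induction l generalizing k with
  | nil => simp [PySem.Chars.find.go, pvSep]
  | cons c rest ih =>
      have hge : -1 ≤ PySem.Chars.find.go pvSep rest 0 :=
        PySem.Chars.neg_one_le_find rest pvSep
      by_cases hpre : pvSep.isPrefixOf (c :: rest)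
      · simp [PySem.Chars.find.go, hpre]
      · simp only [PySem.Chars.find.go, hpre, if_false, Bool.false_eq_true]
        rw [ih (k + 1), ih 1]
        by_cases h : PySem.Chars.find.go pvSep rest 0 = -1
        · simp [h]
        · rw [if_neg h, if_neg (by omega), if_neg (by omega)]
          push_cast; ring

-- one unfolding of find on a cons, for the fixed needle pvSep
lemma pvFind_cons (c : Char) (rest : List Char) :
    PySem.Chars.find (c :: rest) pvSep =
      if pvSep.isPrefixOf (c :: rest) then 0
      else if PySem.Chars.find rest pvSep = -1 then -1
           else 1 + PySem.Chars.find rest pvSep := by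
  by_cases hpre : pvSep.isPrefixOf (c :: rest)
  · simp [PySem.Chars.find, PySem.Chars.find.go, hpre]
  · simp only [PySem.Chars.find, PySem.Chars.find.go, hpre, if_false, Bool.false_eq_true]
    rw [pvFindGo_shift rest 1]
    have hge : -1 ≤ PySem.Chars.find.go pvSep rest 0 :=
      PySem.Chars.neg_one_le_find rest pvSep
    by_cases h : PySem.Chars.find.go pvSep rest 0 = -1
    · simp [h]
    · rw [if_neg h, if_neg (by omega)]
      norm_num

-- splitOn.go does not depend on the fuel once it exceeds the input length
lemma pvGo_fuel (fuel fuel' : Nat) (l cur : List Char) (acc : List (List Char))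
    (h : l.length < fuel) (h' : l.length < fuel') :
    PySem.Chars.splitOn.go pvSep fuel l cur acc = PySem.Chars.splitOn.go pvSep fuel' l cur acc := by
  induction fuel generalizing fuel' l cur acc with
  | zero => omega
  | succ f ih =>
      cases fuel' with
      | zero => omega
      | succ f' =>
          cases l with
          | nil => simp [PySem.Chars.splitOn.go]
          | cons c rest =>
              simp only [PySem.Chars.splitOn.go]
              split_ifs with hpre
              · have h6 : pvSep.length ≤ (c :: rest).length := (List.IsPrefix.length_le (List.isPrefixOf_iff_prefix.mp hpre))
                exact ih f' _ _ _ (by simp_all [pvSep]; omega) (by simp_all [pvSep]; omega)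
              · exact ih f' _ _ _ (by simp at h ⊢; omega) (by simp at h' ⊢; omega)

-- the accumulator of splitOn.go just prepends (reversed)
lemma pvGo_acc (fuel : Nat) (l cur : List Char) (acc : List (List Char)) (h : l.length < fuel) :
    PySem.Chars.splitOn.go pvSep fuel l cur acc
      = acc.reverse ++ PySem.Chars.splitOn.go pvSep fuel l cur [] := by
  induction fuel generalizing l cur acc with
  | zero => omega
  | succ f ih =>
      cases l with
      | nil => simp [PySem.Chars.splitOn.go]
      | cons c rest =>
          simp only [PySem.Chars.splitOn.go]
          split_ifs with hpre
          · have h6 : pvSep.length ≤ (c :: rest).length := (List.IsPrefix.length_le (List.isPrefixOf_iff_prefix.mp hpre))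
            have hlt : (List.drop pvSep.length (c :: rest)).length < f := by
              simp_all [pvSep]; omega
            rw [ih _ _ _ hlt, ih _ _ [cur.reverse] hlt]
            simp
          · have hlt : rest.length < f := by simp at h; omega
            rw [ih _ _ _ hlt, ih _ _ _ hlt]

-- one step of splitOn.go, characterised by find (needle pvSep)
lemma pvGo_char (l : List Char) : ∀ (cur : List Char) (fuel : Nat), l.length < fuel →
    PySem.Chars.splitOn.go pvSep fuel l cur []
      = (if PySem.Chars.find l pvSep = -1 then [cur.reverse ++ l]
         else (cur.reverse ++ l.take (PySem.Chars.find l pvSep).toNat) ::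
              PySem.Chars.splitOn (l.drop ((PySem.Chars.find l pvSep).toNat + 6)) pvSep) := by
  induction l with
  | nil =>
      intro cur fuel h
      cases fuel with
      | zero => omega
      | succ f => simp [PySem.Chars.splitOn.go, PySem.Chars.find, PySem.Chars.find.go, pvSep]
  | cons c rest ih =>
      intro cur fuel h
      cases fuel with
      | zero => omega
      | succ f =>
          by_cases hpre : pvSep.isPrefixOf (c :: rest)
          · -- separator here: emit cur.reverse, restart after the 6 separator chars
            have hfind : PySem.Chars.find (c :: rest) pvSep = 0 := by
              rw [pvFind_cons, if_pos hpre]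
            have h6 : pvSep.length ≤ (c :: rest).length :=
              (List.isPrefixOf_iff_prefix.mp hpre).length_le
            have hlt : (List.drop pvSep.length (c :: rest)).length < f := by
              simp [pvSep] at h6 ⊢
              simp at h
              omega
            simp only [PySem.Chars.splitOn.go, hpre, if_true]
            rw [pvGo_acc f _ _ _ hlt,
                pvGo_fuel f ((List.drop pvSep.length (c :: rest)).length + 1) _ _ _ hlt (by omega),
                hfind]
            simp [PySem.Chars.splitOn, pvSep]
          · have hlt : rest.length < f := by simp at h; omega
            simp only [PySem.Chars.splitOn.go, hpre, if_false, Bool.false_eq_true]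
            rw [ih (c :: cur) f hlt, pvFind_cons, if_neg hpre]
            have hge : -1 ≤ PySem.Chars.find rest pvSep :=
              PySem.Chars.neg_one_le_find rest pvSep
            by_cases hr : PySem.Chars.find rest pvSep = -1
            · simp [hr]
            · have ht : (1 + PySem.Chars.find rest pvSep).toNat
                  = (PySem.Chars.find rest pvSep).toNat + 1 := by omega
              have h56 : (PySem.Chars.find rest pvSep).toNat + 1 + 5
                  = (PySem.Chars.find rest pvSep).toNat + 6 := by omega
              rw [if_neg hr, if_neg (by omega)]
              simp [hr, ht]


-- the split of s: either no separator, or first piece + the split of the rest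
lemma pvSplit_step (s : List Char) :
    PySem.Chars.splitOn s pvSep =
      if PySem.Chars.find s pvSep = -1 then [s]
      else s.take (PySem.Chars.find s pvSep).toNat ::
           PySem.Chars.splitOn (s.drop ((PySem.Chars.find s pvSep).toNat + 6)) pvSep := by
  have := pvGo_char s [] (s.length + 1) (by omega)
  simpa [PySem.Chars.splitOn] using this

-- a prefix of doc ending right after a separator occurrence, written as take
lemma pvTake_sep (doc : List Char) (p f : Nat) (hpf : pvSep <+: doc.drop (p + f)) :
    doc.take (p + f + 6) = doc.take p ++ (doc.drop p).take f ++ pvSep := by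
  obtain ⟨t, ht⟩ := hpf
  have h1 : doc.take (p + (f + 6)) = doc.take p ++ (doc.drop p).take (f + 6) := by
    rw [List.take_add]
  have h2 : (doc.drop p).take (f + 6) = (doc.drop p).take f ++ ((doc.drop p).drop f).take 6 := by
    rw [List.take_add]
  have h3 : (doc.drop p).drop f = doc.drop (p + f) := by
    rw [List.drop_drop]
  have h4 : (doc.drop (p + f)).take 6 = pvSep := by
    rw [← ht]; simp [pvSep]
  calc doc.take (p + f + 6) = doc.take (p + (f + 6)) := by rw [Nat.add_assoc]
    _ = doc.take p ++ ((doc.drop p).take f ++ pvSep) := by rw [h1, h2, h3, h4]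
    _ = doc.take p ++ (doc.drop p).take f ++ pvSep := by rw [List.append_assoc]

-- main loop correspondence: A's greedy section loop from boundary p equals B's find scan
lemma pvMain (doc : List Char) (budget : Int) (hb : budget < (doc.length : Int)) :
    ∀ (fuel p : Nat), p ≤ doc.length → doc.length < p + fuel →
    (pvTrimLoopA budget (PySem.Chars.splitOn (doc.drop p) pvSep) (doc.take p)
      = (if pvScanB doc budget fuel (PySem.Chars.findFrom doc pvSep (p : Int) none)
              (if p = 0 then -1 else (p : Int)) = -1 then []
         else doc.take (pvScanB doc budget fuel (PySem.Chars.findFrom doc pvSep (p : Int) none)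
              (if p = 0 then -1 else (p : Int))).toNat))
    ∧ (pvScanB doc budget fuel (PySem.Chars.findFrom doc pvSep (p : Int) none)
          (if p = 0 then -1 else (p : Int)) = -1
       ∨ (0 < pvScanB doc budget fuel (PySem.Chars.findFrom doc pvSep (p : Int) none)
              (if p = 0 then -1 else (p : Int))
          ∧ pvScanB doc budget fuel (PySem.Chars.findFrom doc pvSep (p : Int) none)
              (if p = 0 then -1 else (p : Int)) ≤ (doc.length : Int))) := by
  intro fuel
  induction fuel with
  | zero => intro p hp hf; omega
  | succ f ih =>
      intro p hp hf
      have hffn : PySem.Chars.findFrom doc pvSep (p : Int) none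
          = if PySem.Chars.find (doc.drop p) pvSep = -1 then -1
            else (p : Int) + PySem.Chars.find (doc.drop p) pvSep :=
        PySem.Chars.findFrom_natCast doc pvSep p hp
      have htl : (doc.take p).length = p := by simp; omega
      by_cases hfd : PySem.Chars.find (doc.drop p) pvSep = -1
      · -- no further separator: A refuses the last candidate, B's scan stops at -1
        rw [pvSplit_step, if_pos hfd, hffn, if_pos hfd]
        have hcond : ¬ (((doc.take p).length : Int) + ((doc.drop p ++ pvSep).length : Int) ≤ budget) := by
          simp [htl, pvSep]
          omega
        have hscan : pvScanB doc budget (f + 1) (-1) (if p = 0 then -1 else (p : Int))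
            = (if p = 0 then -1 else (p : Int)) := by simp [pvScanB]
        simp only [pvTrimLoopA]
        rw [if_neg hcond, hscan]
        by_cases hp0 : p = 0
        · subst hp0; simp
        · rw [if_neg hp0, if_neg (show ¬((p : Nat) : Int) = -1 by omega)]
          exact ⟨by simp, Or.inr ⟨by omega, by omega⟩⟩
      · -- a separator at relative offset n: both sides take the same step or both stop
        have hge : 0 ≤ PySem.Chars.find (doc.drop p) pvSep := by
          have := PySem.Chars.neg_one_le_find (doc.drop p) pvSep; omega
        obtain ⟨n, hfrn⟩ : ∃ n : Nat, PySem.Chars.find (doc.drop p) pvSep = (n : Int) :=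
          ⟨_, (Int.toNat_of_nonneg hge).symm⟩
        have hpre6 : pvSep <+: doc.drop (p + n) := by
          have hsp := (PySem.Chars.find_spec (s := doc.drop p) (sub := pvSep) hge).1
          rw [hfrn] at hsp
          simp only [Int.toNat_natCast] at hsp
          rwa [List.drop_drop] at hsp
        have hlen6 : p + n + 6 ≤ doc.length := by
          have := hpre6.length_le
          simp [pvSep, List.length_drop] at this
          omega
        rw [pvSplit_step, if_neg hfd, hffn, if_neg hfd, hfrn]
        simp only [Int.toNat_natCast]
        have hdd : (doc.drop p).drop (n + 6) = doc.drop (p + n + 6) := by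
          rw [List.drop_drop, ← Nat.add_assoc]
        rw [hdd]
        have htake : ((doc.drop p).take n).length = n := by
          simp [List.length_take, List.length_drop]; omega
        have hclen : (((doc.drop p).take n ++ pvSep).length : Int) = (n : Int) + 6 := by
          simp [pvSep, htake]
        simp only [pvTrimLoopA, pvScanB]
        by_cases hle : (p : Int) + (n : Int) + 6 ≤ budget
        · -- both take the step and recurse from boundary p + n + 6
          have hA : ((doc.take p).length : Int) + (((doc.drop p).take n ++ pvSep).length : Int) ≤ budget := by
            rw [htl, hclen]; omega
          have hB : ((p : Int) + (n : Int) ≠ -1) ∧ (p : Int) + (n : Int) + 6 ≤ budget :=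
            ⟨by omega, hle⟩
          rw [if_pos hB, if_pos hA]
          have htr : doc.take p ++ ((doc.drop p).take n ++ pvSep) = doc.take (p + n + 6) := by
            rw [← List.append_assoc, ← pvTake_sep doc p n hpre6]
          rw [htr]
          have harg : ((p : Int) + (n : Int) + 6) = ((p + n + 6 : Nat) : Int) := by push_cast; ring
          rw [harg]
          have hstep := ih (p + n + 6) hlen6 (by omega)
          rw [if_neg (show ¬ (p + n + 6 = 0) by omega)] at hstep
          exact hstep
        · -- both stop: A keeps trimmed = take p, B returns the stored cut
          have hA : ¬ (((doc.take p).length : Int) + (((doc.drop p).take n ++ pvSep).length : Int) ≤ budget) := by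
            rw [htl, hclen]; omega
          have hB : ¬ (((p : Int) + (n : Int) ≠ -1) ∧ (p : Int) + (n : Int) + 6 ≤ budget) := by
            intro hcontra; exact hle hcontra.2
          rw [if_neg hB, if_neg hA]
          by_cases hp0 : p = 0
          · subst hp0; simp
          · rw [if_neg hp0, if_neg (show ¬((p : Nat) : Int) = -1 by omega)]
            exact ⟨by simp, Or.inr ⟨by omega, by omega⟩⟩

-- ===== VERDICT (by name: the statement is the Claim_ definition above) =====
theorem trim_document_to_budget_spec : Claim_equal_trim_document_to_budget := by
  intro document char_budget _
  unfold Spec_trim_document_to_budget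
  simp only [trim_document_to_budget, trim_document_to_budget_alt]
  by_cases hearly : PySem.Chars.len document.toList ≤ char_budget
  · rw [if_pos hearly, if_pos hearly]
  · rw [if_neg hearly, if_neg hearly]
    have hb : char_budget < (document.toList.length : Int) := by
      have hl : PySem.Chars.len document.toList = (document.toList.length : Int) := by
        simp [PySem.Chars.len]
      omega
    have hmain := pvMain document.toList char_budget hb (document.toList.length + 1) 0
      (by omega) (by omega)
    simp only [Nat.cast_zero, PySem.Chars.findFrom_zero, List.take_zero, List.drop_zero,
      reduceIte] at hmain
    obtain ⟨hA, hinv⟩ := hmain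
    rw [hA]
    by_cases hc1 : pvScanB document.toList char_budget (document.toList.length + 1)
        (PySem.Chars.find document.toList pvSep) (-1) = -1
    · -- both fall back to the first section sliced by the budget
      rw [if_pos hc1, if_neg (show ¬ ([] : List Char) ≠ [] by simp),
          if_neg (show ¬ (pvScanB document.toList char_budget (document.toList.length + 1)
            (PySem.Chars.find document.toList pvSep) (-1) ≠ -1) from fun h => h hc1)]
      by_cases hfind : PySem.Chars.find document.toList pvSep = -1
      · rw [pvSplit_step, if_pos hfind, if_pos hfind]
        simp [PySem.List.pyGetD, PySem.List.pyGet?, PySem.List.pyIdx?]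
      · rw [pvSplit_step, if_neg hfind, if_neg hfind]
        have hge : 0 ≤ PySem.Chars.find document.toList pvSep := by
          have := PySem.Chars.neg_one_le_find document.toList pvSep; omega
        rw [PySem.Chars.slice_eq_listSlice document.toList, PySem.List.slice_to _ hge]
        simp [PySem.List.pyGetD, PySem.List.pyGet?, PySem.List.pyIdx?]
    · -- both return the prefix up to the last fitting separator end
      have hpos : 0 < pvScanB document.toList char_budget (document.toList.length + 1)
          (PySem.Chars.find document.toList pvSep) (-1) := by
        rcases hinv with h | h
        · exact absurd h hc1
        · exact h.1
      have hle : pvScanB document.toList char_budget (document.toList.length + 1)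
          (PySem.Chars.find document.toList pvSep) (-1) ≤ (document.toList.length : Int) := by
        rcases hinv with h | h
        · exact absurd h hc1
        · exact h.2
      have hne : List.take (pvScanB document.toList char_budget (document.toList.length + 1)
          (PySem.Chars.find document.toList pvSep) (-1)).toNat document.toList ≠ [] := by
        intro hnil
        have hlen0 := congrArg List.length hnil
        simp only [List.length_take, List.length_nil] at hlen0
        omega
      rw [if_neg hc1, if_pos hne, if_pos hc1,
          PySem.Chars.slice_eq_listSlice document.toList, PySem.List.slice_to _ (by omega)]
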